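-- pv_equiv track=rewrite | github.com/jaswanth-0821/neetcode-DSA | Data Structures & Algorithms/longest-repeating-substring-with-replacement/submission-0.py | check
-- ===== SOURCE A (Python) =====
-- def check(x):
--     values = list(x.values())
--     values = [v for v in values if v>0]
--     if not values:
--         return -1
--     if len(values)==1:
--         return -1
--
--     return sum(values) - max(values)
-- ===== SOURCE B (Python) =====
-- def check(x):
--     pos = sorted(v for v in x.values() if v > 0)
--     if len(pos) < 2:
--         return -1
--     return sum(pos[:-1])
-- ===== Notes on version B (the rewrite author's own statement) =====
-- stated objective: alternative
-- what changed: B filters the positive values, sorts them ascending and returns the sum of all but the last element, instead of A's separate sum and max scans with two early-return guards.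
import Mathlib
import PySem

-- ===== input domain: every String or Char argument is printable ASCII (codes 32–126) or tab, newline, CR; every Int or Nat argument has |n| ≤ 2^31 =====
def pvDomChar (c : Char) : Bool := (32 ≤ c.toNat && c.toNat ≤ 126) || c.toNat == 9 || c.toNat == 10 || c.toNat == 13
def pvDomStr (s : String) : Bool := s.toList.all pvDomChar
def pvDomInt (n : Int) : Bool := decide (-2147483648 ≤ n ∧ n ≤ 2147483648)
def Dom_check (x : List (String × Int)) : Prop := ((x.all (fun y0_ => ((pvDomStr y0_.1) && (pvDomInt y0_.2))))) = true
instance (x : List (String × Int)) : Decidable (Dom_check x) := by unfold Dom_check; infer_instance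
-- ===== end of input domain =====

-- B computes sum-of-positives-minus-their-max by sorting the positives and summing all but the
-- largest, instead of A's separate sum and max scans; alternative decomposition, not faster.

-- ===== PORT A =====
def check (x : List (String × Int)) : Int :=
  let values := x.map (fun p => p.2)
  let values := values.filter (fun v => decide (0 < v))
  if values.isEmpty then -1
  else if values.length == 1 then -1
  else
    match PySem.List.max? values (fun v => v) with
    | some m => values.sum - m
    | none => -1   -- unreachable: values nonempty here

-- ===== PORT B =====
def check_alt (x : List (String × Int)) : Int :=
  let pos := PySem.List.sorted ((x.map (fun p => p.2)).filter (fun v => decide (0 < v))) (fun v => v) false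
  if pos.length < 2 then -1
  else (PySem.List.slice pos none (some (-1))).sum

-- ===== PRECONDITION & SPEC =====
def Spec_check (x : List (String × Int)) (out : Int) : Prop := out = check_alt x
instance (x : List (String × Int)) (out : Int) : Decidable (Spec_check x out) := by unfold Spec_check; infer_instance

-- ===== CLAIM (what is proved, stated in full; the proofs are below) =====
def Claim_equal_check : Prop := ∀ (x : List (String × Int)), Dom_check x → Spec_check x (check x)

-- ===== LEMMAS AND PROOFS =====

theorem le_getLast_of_pairwise (l : List Int) (h : l.Pairwise (· ≤ ·)) (hne : l ≠ [])
    (y : Int) (hy : y ∈ l) : y ≤ l.getLast hne := by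
  induction l with
  | nil => exact absurd rfl hne
  | cons a t ih =>
    by_cases ht : t = []
    · subst ht; simp at hy; simp [hy]
    · have hpc := List.pairwise_cons.mp h
      rw [List.getLast_cons ht]
      rcases List.mem_cons.mp hy with rfl | hyt
      · exact hpc.1 _ (List.getLast_mem ht)
      · exact ih hpc.2 ht hyt

-- ===== VERDICT (by name: the statement is the Claim_ definition above) =====
theorem check_key (vs : List Int) :
    (if vs.isEmpty then (-1 : Int) else if vs.length == 1 then -1 else
      match PySem.List.max? vs (fun v => v) with
      | some m => vs.sum - m
      | none => -1)
    = (if (PySem.List.sorted vs (fun v => v) false).length < 2 then (-1 : Int)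
       else (PySem.List.slice (PySem.List.sorted vs (fun v => v) false) none (some (-1))).sum) := by
  set s := PySem.List.sorted vs (fun v => v) false with hs
  have hlen : s.length = vs.length := PySem.List.length_sorted ..
  by_cases h0 : vs = []
  · subst h0; simp [hs, PySem.List.sorted]
  · by_cases h1 : vs.length = 1
    · have hl2 : s.length < 2 := by omega
      simp [List.isEmpty_iff, h0, h1, hl2]
    · have hvne : vs.length ≥ 2 := by
        have := List.length_pos_iff.mpr h0
        omega
      have hsne : s ≠ [] := by
        intro h; rw [h] at hlen
        exact h0 (List.eq_nil_of_length_eq_zero hlen.symm)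
      obtain ⟨m, hm⟩ : ∃ m, PySem.List.max? vs (fun v => v) = some m := by
        rcases h : PySem.List.max? vs (fun v => v) with _ | m
        · exact absurd ((PySem.List.max?_eq_none_iff ..).mp h) h0
        · exact ⟨m, rfl⟩
      have hnl : ¬ s.length < 2 := by omega
      simp only [List.isEmpty_iff, h0, if_false, beq_iff_eq, h1, if_false, hm, hnl,
        PySem.List.slice_to_neg_one]
      have hpw : s.Pairwise (· ≤ ·) := by
        have := PySem.List.sorted_pairwise (xs := vs) (key := fun v => v)
        simpa [hs] using this
      have hglast : s.getLast hsne = m := by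
        apply le_antisymm
        · exact PySem.List.max?_isMax hm _ ((PySem.List.mem_sorted ..).mp (List.getLast_mem hsne))
        · exact le_getLast_of_pairwise s hpw hsne m
            ((PySem.List.mem_sorted ..).mpr (PySem.List.max?_mem hm))
      have hsum : s.sum = vs.sum := (PySem.List.sorted_perm ..).sum_eq
      have hsplit : s.dropLast.sum + s.getLast hsne = s.sum := by
        conv_rhs => rw [← List.dropLast_append_getLast hsne]
        simp
      omega

-- ===== VERDICT (by name: the statement is the Claim_ definition above) =====
theorem check_spec : Claim_equal_check := by
  intro x _
  unfold Spec_check check check_alt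
  exact check_key _
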